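-- pv_equiv track=rewrite | github.com/shlokkvaishnav/sizzle | backend/modules/revenue/combo_engine.py | _classify_category_groups
-- ===== SOURCE A (Python) =====
-- _COMBO_CATEGORY_GROUPS = {
--     "main": {"Main Course", "Mains", "Biryani", "Rice", "Thali"},
--     "bread": {"Breads", "Roti", "Naan"},
--     "side": {"Starters", "Appetizers", "Sides", "Salads", "Raita"},
--     "drink": {"Beverages", "Drinks", "Juices", "Lassi"},
--     "dessert": {"Desserts", "Sweets"},
-- }
--
-- def _classify_category_groups(category_names: list[str]) -> set[str]:
--     """Map category names to abstract groups (main, bread, side, drink, dessert)."""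
--     groups = set()
--     for cat_name in category_names:
--         for group, cat_set in _COMBO_CATEGORY_GROUPS.items():
--             if cat_name in cat_set:
--                 groups.add(group)
--                 break
--         else:
--             groups.add("other")
--     return groups
-- ===== SOURCE B (Python) =====
-- _COMBO_CATEGORY_GROUPS = {
--     "main": {"Main Course", "Mains", "Biryani", "Rice", "Thali"},
--     "bread": {"Breads", "Roti", "Naan"},
--     "side": {"Starters", "Appetizers", "Sides", "Salads", "Raita"},
--     "drink": {"Beverages", "Drinks", "Juices", "Lassi"},
--     "dessert": {"Desserts", "Sweets"},
-- }
--
-- _REVERSE = {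
--     name: group
--     for group, names in _COMBO_CATEGORY_GROUPS.items()
--     for name in names
-- }
--
-- def _classify_category_groups(category_names: list[str]) -> set[str]:
--     """Map category names to abstract groups via one flat reverse-lookup table."""
--     return {_REVERSE.get(name, "other") for name in category_names}
-- ===== Notes on version B (the rewrite author's own statement) =====
-- stated objective: faster
-- what changed: A's nested scan over the group dict with for/else+break is replaced by a single precomputed flat reverse-lookup dict (name -> group), making the function body a one-line set comprehension with one hashed lookup per name; the nested loop and its for/else control flow are eliminated entirely.
import Mathlib
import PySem

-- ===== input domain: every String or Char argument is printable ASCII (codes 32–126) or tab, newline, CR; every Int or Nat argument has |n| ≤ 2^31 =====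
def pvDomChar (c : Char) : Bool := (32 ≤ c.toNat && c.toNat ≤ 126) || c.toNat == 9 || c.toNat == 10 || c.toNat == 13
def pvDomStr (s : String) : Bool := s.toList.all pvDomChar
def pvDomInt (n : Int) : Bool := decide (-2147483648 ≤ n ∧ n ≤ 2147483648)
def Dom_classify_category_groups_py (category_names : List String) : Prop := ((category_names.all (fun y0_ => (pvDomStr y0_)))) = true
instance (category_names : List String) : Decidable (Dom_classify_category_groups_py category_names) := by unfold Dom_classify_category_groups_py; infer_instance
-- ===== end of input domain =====

-- B replaces A's nested scan with a break/else by one precomputed flat reverse-lookup dict (objective: faster, one hash lookup per name instead of a nested scan).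

-- ===== PORT A =====
-- _COMBO_CATEGORY_GROUPS: dict of sets, as an association list of element lists (membership only)
def pvComboItems : List (String × List String) :=
  [("main", ["Main Course", "Mains", "Biryani", "Rice", "Thali"]),
   ("bread", ["Breads", "Roti", "Naan"]),
   ("side", ["Starters", "Appetizers", "Sides", "Salads", "Raita"]),
   ("drink", ["Beverages", "Drinks", "Juices", "Lassi"]),
   ("dessert", ["Desserts", "Sweets"])]

-- the inner 'for group, cat_set ... break / else' loop of A
def pvFindGroup (items : List (String × List String)) (c : String) : String :=
  match items with
  | [] => "other"
  | (g, s) :: rest => if s.contains c then g else pvFindGroup rest c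

def classify_category_groups_py (category_names : List String) : List String :=
  category_names.foldl (fun groups c => PySem.Set.add groups (pvFindGroup pvComboItems c)) PySem.Set.empty

-- ===== PORT B =====
-- the flat reverse-lookup dict {name: group, ...}
def pvReverse : PySem.Dict String String :=
  PySem.Dict.ofList
    [("Main Course", "main"), ("Mains", "main"), ("Biryani", "main"), ("Rice", "main"), ("Thali", "main"),
     ("Breads", "bread"), ("Roti", "bread"), ("Naan", "bread"),
     ("Starters", "side"), ("Appetizers", "side"), ("Sides", "side"), ("Salads", "side"), ("Raita", "side"),
     ("Beverages", "drink"), ("Drinks", "drink"), ("Juices", "drink"), ("Lassi", "drink"),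
     ("Desserts", "dessert"), ("Sweets", "dessert")]

def classify_category_groups_py_alt (category_names : List String) : List String :=
  category_names.foldl (fun groups c => PySem.Set.add groups (PySem.Dict.getD pvReverse c "other")) PySem.Set.empty

-- ===== PRECONDITION & SPEC =====
def Spec_classify_category_groups_py (category_names : List String) (out : List String) : Prop := out = classify_category_groups_py_alt category_names
instance (category_names : List String) (out : List String) : Decidable (Spec_classify_category_groups_py category_names out) := by unfold Spec_classify_category_groups_py; infer_instance

-- ===== CLAIM (what is proved, stated in full; the proofs are below) =====
def Claim_equal_classify_category_groups_py : Prop := ∀ (category_names : List String), Dom_classify_category_groups_py category_names → Spec_classify_category_groups_py category_names (classify_category_groups_py category_names)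

-- ===== LEMMAS AND PROOFS =====

-- per-name agreement: A's first-matching-group scan equals B's reverse-dict lookup
set_option maxRecDepth 4000 in
theorem pvFindGroup_eq_lookup (c : String) :
    pvFindGroup pvComboItems c = PySem.Dict.getD pvReverse c "other" := by
  by_cases h1 : c = "Main Course"; · subst h1; decide
  by_cases h2 : c = "Mains"; · subst h2; decide
  by_cases h3 : c = "Biryani"; · subst h3; decide
  by_cases h4 : c = "Rice"; · subst h4; decide
  by_cases h5 : c = "Thali"; · subst h5; decide
  by_cases h6 : c = "Breads"; · subst h6; decide
  by_cases h7 : c = "Roti"; · subst h7; decide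
  by_cases h8 : c = "Naan"; · subst h8; decide
  by_cases h9 : c = "Starters"; · subst h9; decide
  by_cases h10 : c = "Appetizers"; · subst h10; decide
  by_cases h11 : c = "Sides"; · subst h11; decide
  by_cases h12 : c = "Salads"; · subst h12; decide
  by_cases h13 : c = "Raita"; · subst h13; decide
  by_cases h14 : c = "Beverages"; · subst h14; decide
  by_cases h15 : c = "Drinks"; · subst h15; decide
  by_cases h16 : c = "Juices"; · subst h16; decide
  by_cases h17 : c = "Lassi"; · subst h17; decide
  by_cases h18 : c = "Desserts"; · subst h18; decide
  by_cases h19 : c = "Sweets"; · subst h19; decide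
  have hit : pvReverse.items =
      [("Main Course", "main"), ("Mains", "main"), ("Biryani", "main"), ("Rice", "main"), ("Thali", "main"),
       ("Breads", "bread"), ("Roti", "bread"), ("Naan", "bread"),
       ("Starters", "side"), ("Appetizers", "side"), ("Sides", "side"), ("Salads", "side"), ("Raita", "side"),
       ("Beverages", "drink"), ("Drinks", "drink"), ("Juices", "drink"), ("Lassi", "drink"),
       ("Desserts", "dessert"), ("Sweets", "dessert")] := by decide
  have e1 : (("Main Course" : String) == c) = false := beq_eq_false_iff_ne.mpr (Ne.symm h1)
  have e2 : (("Mains" : String) == c) = false := beq_eq_false_iff_ne.mpr (Ne.symm h2)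
  have e3 : (("Biryani" : String) == c) = false := beq_eq_false_iff_ne.mpr (Ne.symm h3)
  have e4 : (("Rice" : String) == c) = false := beq_eq_false_iff_ne.mpr (Ne.symm h4)
  have e5 : (("Thali" : String) == c) = false := beq_eq_false_iff_ne.mpr (Ne.symm h5)
  have e6 : (("Breads" : String) == c) = false := beq_eq_false_iff_ne.mpr (Ne.symm h6)
  have e7 : (("Roti" : String) == c) = false := beq_eq_false_iff_ne.mpr (Ne.symm h7)
  have e8 : (("Naan" : String) == c) = false := beq_eq_false_iff_ne.mpr (Ne.symm h8)
  have e9 : (("Starters" : String) == c) = false := beq_eq_false_iff_ne.mpr (Ne.symm h9)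
  have e10 : (("Appetizers" : String) == c) = false := beq_eq_false_iff_ne.mpr (Ne.symm h10)
  have e11 : (("Sides" : String) == c) = false := beq_eq_false_iff_ne.mpr (Ne.symm h11)
  have e12 : (("Salads" : String) == c) = false := beq_eq_false_iff_ne.mpr (Ne.symm h12)
  have e13 : (("Raita" : String) == c) = false := beq_eq_false_iff_ne.mpr (Ne.symm h13)
  have e14 : (("Beverages" : String) == c) = false := beq_eq_false_iff_ne.mpr (Ne.symm h14)
  have e15 : (("Drinks" : String) == c) = false := beq_eq_false_iff_ne.mpr (Ne.symm h15)
  have e16 : (("Juices" : String) == c) = false := beq_eq_false_iff_ne.mpr (Ne.symm h16)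
  have e17 : (("Lassi" : String) == c) = false := beq_eq_false_iff_ne.mpr (Ne.symm h17)
  have e18 : (("Desserts" : String) == c) = false := beq_eq_false_iff_ne.mpr (Ne.symm h18)
  have e19 : (("Sweets" : String) == c) = false := beq_eq_false_iff_ne.mpr (Ne.symm h19)
  simp [pvFindGroup, pvComboItems, PySem.Dict.getD, PySem.Dict.get?, hit, List.find?,
        h1, h2, h3, h4, h5, h6, h7, h8, h9, h10, h11, h12, h13, h14, h15, h16, h17, h18, h19, e1, e2, e3, e4, e5, e6, e7, e8, e9, e10, e11, e12, e13, e14, e15, e16, e17, e18, e19]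

-- ===== VERDICT (by name: the statement is the Claim_ definition above) =====
theorem classify_category_groups_py_spec : Claim_equal_classify_category_groups_py := by
  intro category_names _
  unfold Spec_classify_category_groups_py classify_category_groups_py classify_category_groups_py_alt
  congr 1
  funext groups c
  rw [pvFindGroup_eq_lookup]
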